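-- pv_equiv track=rewrite | github.com/sydleither/ChemEco-ALife-2024 | graph_generation_utils.py | symmetric_edges
-- ===== SOURCE A (Python) =====
-- def symmetric_edges(num_vals, internal, external):
--     edge_probs = []
--     for i in range(num_vals):
--         edge_probs.append([])
--         for j in range(num_vals):
--             if i == j:
--                 edge_probs[i].append(internal)
--             else:
--                 edge_probs[i].append(external)
--     return edge_probs
-- ===== SOURCE B (Python) =====
-- def symmetric_edges(num_vals, internal, external):
--     # Circulant construction: build only the first row explicitly; every later
--     # row is the previous row rotated right by one, which moves the diagonal
--     # entry one step along -- no per-cell i == j test at all.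
--     if num_vals <= 0:
--         return []
--     row = [internal] + [external] * (num_vals - 1)
--     rows = [row]
--     for _ in range(num_vals - 1):
--         row = row[-1:] + row[:-1]
--         rows.append(row)
--     return rows
-- ===== Notes on version B (the rewrite author's own statement) =====
-- stated objective: alternative
-- what changed: B builds only the first row explicitly and generates every subsequent row by rotating the previous row right by one (circulant construction), instead of A's nested loop testing i == j for each cell.
import Mathlib
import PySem

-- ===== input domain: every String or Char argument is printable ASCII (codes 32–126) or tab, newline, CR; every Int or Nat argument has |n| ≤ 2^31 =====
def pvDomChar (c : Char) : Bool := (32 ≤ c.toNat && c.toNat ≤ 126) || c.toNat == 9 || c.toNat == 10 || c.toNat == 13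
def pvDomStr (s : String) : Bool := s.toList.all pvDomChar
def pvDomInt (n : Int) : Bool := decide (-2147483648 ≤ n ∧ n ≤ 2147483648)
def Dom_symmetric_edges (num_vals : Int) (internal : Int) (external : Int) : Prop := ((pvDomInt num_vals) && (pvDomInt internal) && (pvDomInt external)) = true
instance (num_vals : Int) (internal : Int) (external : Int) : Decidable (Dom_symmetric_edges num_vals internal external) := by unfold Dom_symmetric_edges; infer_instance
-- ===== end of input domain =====

-- B replaces A's per-cell i == j test by building the first row and rotating it right once per further row (circulant construction); same cost, different algorithm.

-- ===== PORT A =====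
-- A: nested loops, appending a fresh empty row then appending entries to edge_probs[i].
-- i comes from range(num_vals) so i ≥ 0 and edge_probs has i+1 rows: i.toNat indexing is exact here.
def symmetric_edges (num_vals : Int) (internal : Int) (external : Int) : List (List Int) :=
  (PySem.List.pyRange 0 num_vals 1).foldl (fun ep i =>
    let ep1 := ep ++ [([] : List Int)]
    (PySem.List.pyRange 0 num_vals 1).foldl (fun ep2 j =>
      ep2.set i.toNat (ep2.getD i.toNat [] ++ [if i == j then internal else external])) ep1) []

-- ===== PORT B =====
-- B: first row is [internal] + [external]*(n-1); each later row is the previous one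
-- rotated right by one (row[-1:] + row[:-1], ported via PySem slices); the loop
-- variable of 'for _ in range(num_vals - 1)' is ignored, as in the Python.
def symmetric_edges_alt (num_vals : Int) (internal : Int) (external : Int) : List (List Int) :=
  if num_vals ≤ 0 then []
  else
    let row0 : List Int := internal :: List.replicate (num_vals - 1).toNat external
    let s := (PySem.List.pyRange 0 (num_vals - 1) 1).foldl
      (fun (s : List Int × List (List Int)) _ =>
        let r := PySem.List.slice s.1 (some (-1)) none ++ PySem.List.slice s.1 none (some (-1))
        (r, s.2 ++ [r])) (row0, [row0])
    s.2

-- ===== PRECONDITION & SPEC =====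
def Spec_symmetric_edges (num_vals : Int) (internal : Int) (external : Int) (out : List (List Int)) : Prop := out = symmetric_edges_alt num_vals internal external
instance (num_vals : Int) (internal : Int) (external : Int) (out : List (List Int)) : Decidable (Spec_symmetric_edges num_vals internal external out) := by unfold Spec_symmetric_edges; infer_instance

-- ===== CLAIM (what is proved, stated in full; the proofs are below) =====
def Claim_equal_symmetric_edges : Prop := ∀ (num_vals : Int) (internal : Int) (external : Int), Dom_symmetric_edges num_vals internal external → Spec_symmetric_edges num_vals internal external (symmetric_edges num_vals internal external)

-- ===== LEMMAS AND PROOFS =====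

-- inner loop of A: appends the computed entries onto the (last) row r
theorem inner_fold (internal external : Int) (i : Int) (L : List Int)
    (ep0 : List (List Int)) (r : List Int) (h : ep0.length = i.toNat) :
    L.foldl (fun ep2 j =>
      ep2.set i.toNat (ep2.getD i.toNat [] ++ [if i == j then internal else external])) (ep0 ++ [r])
    = ep0 ++ [r ++ L.map (fun j => if i == j then internal else external)] := by
  induction L generalizing r with
  | nil => simp
  | cons a t ih =>
      have hget : (ep0 ++ [r]).getD i.toNat [] = r := by
        rw [← h]; simp [List.getD, List.getElem?_append_right]
      have hset : ∀ x : List Int, (ep0 ++ [r]).set i.toNat x = ep0 ++ [x] := by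
        intro x; rw [← h]
        rw [List.set_append_right _ _ (le_refl _)]
        simp
      simp only [List.foldl_cons, hget, hset]
      rw [ih]
      simp

-- A's row i equals replicate external with the diagonal set
theorem row_eq (num_vals internal external : Int) (k : Nat) (hk : (k : Int) < num_vals) :
    ((List.range num_vals.toNat).map (fun (t : Nat) => (t : Int))).map
      (fun j => if (k : Int) == j then internal else external)
    = (List.replicate num_vals.toNat external).set k internal := by
  apply List.ext_getElem
  · simp
  · intro j h1 h2
    simp only [List.map_map, Function.comp, List.getElem_map, List.getElem_range,
      List.getElem_set, List.getElem_replicate]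
    have hb : ((k : Int) == (j : Int)) = decide (k = j) := by
      by_cases hkj : k = j <;> simp [hkj]
    rw [hb]
    by_cases hkj : k = j <;> simp [hkj]

theorem outer_fold (num_vals internal external : Int) (m : Nat) (hm : m ≤ num_vals.toNat) :
    ((List.range m).map (fun (k : Nat) => ((0:Int) + (k : Int)))).foldl (fun ep i =>
      let ep1 := ep ++ [([] : List Int)]
      ((List.range num_vals.toNat).map (fun (k : Nat) => ((0:Int) + (k : Int)))).foldl (fun ep2 j =>
        ep2.set i.toNat (ep2.getD i.toNat [] ++ [if i == j then internal else external])) ep1) []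
    = ((List.range m).map (fun (k : Nat) => ((0:Int) + (k : Int)))).map (fun i =>
        (List.replicate num_vals.toNat external).set i.toNat internal) := by
  induction m with
  | zero => simp
  | succ m ih =>
      rw [List.range_succ]
      simp only [List.map_append, List.map_cons, List.map_nil, List.foldl_append,
        List.foldl_cons, List.foldl_nil, ih (Nat.le_of_succ_le hm)]
      simp only [Int.zero_add]
      have hlen : (((List.range m).map (fun (k : Nat) => ((k : Int)))).map (fun i =>
          (List.replicate num_vals.toNat external).set i.toNat internal)).length
          = ((m : Int)).toNat := by simp
      have hk : ((m : Int)) < num_vals := by omega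
      rw [inner_fold internal external _ _ _ _ hlen, List.nil_append,
        row_eq num_vals internal external m hk]
      simp

-- rotating a diagonal row right by one moves the diagonal entry one step right
theorem rot_set (internal external : Int) (n k : Nat) (h : k + 1 < n) :
    (((List.replicate n external).set k internal).drop
        (((List.replicate n external).set k internal).length - 1)) ++
      ((List.replicate n external).set k internal).dropLast
    = (List.replicate n external).set (k + 1) internal := by
  have hlen : ((List.replicate n external).set k internal).length = n := by simp
  have hdrop : ((List.replicate n external).set k internal).drop (n - 1) = [external] := by
    apply List.ext_getElem
    · simp; omega
    · intro j h1 h2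
      simp only [List.length_drop, hlen] at h1
      have hj0 : j = 0 := by omega
      subst hj0
      rw [List.getElem_drop]
      simp only [List.getElem_set, List.getElem_replicate]
      have : ¬ (k = n - 1 + 0) := by omega
      simp [this]
      intro hk
      omega
  have hdl : ((List.replicate n external).set k internal).dropLast
      = (List.replicate (n - 1) external).set k internal := by
    apply List.ext_getElem
    · simp
    · intro j h1 h2
      rw [List.getElem_dropLast]
      simp only [List.getElem_set, List.getElem_replicate]
  rw [hlen, hdrop, hdl]
  have hn : n = (n - 1) + 1 := by omega
  conv_rhs => rw [hn, List.replicate_succ, List.set_cons_succ]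
  simp

-- B's loop: each iteration rotates and appends; the loop variable is ignored
theorem fold_rot (internal external : Int) (n : Nat) (L : List Int) (k : Nat)
    (acc : List (List Int)) (h : k + L.length < n) :
    L.foldl (fun (s : List Int × List (List Int)) _ =>
        let r := s.1.drop (s.1.length - 1) ++ s.1.dropLast
        (r, s.2 ++ [r])) ((List.replicate n external).set k internal, acc)
    = ((List.replicate n external).set (k + L.length) internal,
       acc ++ (List.range L.length).map (fun t => (List.replicate n external).set (k + 1 + t) internal)) := by
  induction L generalizing k acc with
  | nil => simp
  | cons a t ih =>
      simp only [List.foldl_cons, List.length_cons]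
      rw [rot_set internal external n k (by simp at h; omega)]
      rw [ih (k + 1) _ (by simp at h; omega)]
      simp only [Prod.mk.injEq]
      constructor
      · congr 1; omega
      · rw [List.range_succ_eq_map]
        simp only [List.map_cons, List.map_map, List.append_assoc, List.singleton_append]
        congr 1
        congr 1
        apply List.map_congr_left
        intro a _
        simp only [Function.comp_apply]
        congr 1
        omega

-- ===== VERDICT (by name: the statement is the Claim_ definition above) =====
theorem symmetric_edges_spec : Claim_equal_symmetric_edges := by
  intro num_vals internal external _
  unfold Spec_symmetric_edges symmetric_edges symmetric_edges_alt
  rw [PySem.List.pyRange_one, PySem.List.pyRange_one]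
  simp only [Int.sub_zero]
  rw [outer_fold num_vals internal external num_vals.toNat (le_refl _)]
  by_cases hle : num_vals ≤ 0
  · have h0 : num_vals.toNat = 0 := by omega
    simp [hle, h0]
  · simp only [hle, if_false]
    have hn : 1 ≤ num_vals.toNat := by omega
    simp only [PySem.List.slice_from_neg_one, PySem.List.slice_to_neg_one]
    have hrow0 : (internal :: List.replicate (num_vals - 1).toNat external)
        = (List.replicate num_vals.toNat external).set 0 internal := by
      have hv : num_vals.toNat = (num_vals - 1).toNat + 1 := by omega
      rw [hv]
      simp [List.replicate_succ]
    rw [hrow0]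
    have hL : ((List.range (num_vals - 1).toNat).map (fun (k : Nat) => ((0:Int) + (k : Int)))).length
        = num_vals.toNat - 1 := by simp
    rw [fold_rot internal external num_vals.toNat _ 0 _ (by rw [hL]; omega)]
    simp only [hL, List.map_map]
    -- LHS rows list must equal A's rows
    have hr : num_vals.toNat = (num_vals.toNat - 1) + 1 := by omega
    conv_lhs => rw [hr, List.range_succ_eq_map]
    simp only [List.map_cons, List.map_map, Function.comp]
    rw [List.singleton_append]
    congr 1
    · rw [← hr]; simp
    · apply List.map_congr_left
      intro t _
      simp only [Function.comp_apply, Int.zero_add, Int.toNat_natCast, ← hr]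
      congr 1
      omega
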